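-- pv_equiv track=rewrite | github.com/HUIXIN-TW/BasicPython | analysiswithlist.py | mn1
-- ===== SOURCE A (Python) =====
-- def mn1(date_case):
--     min_list = []
--     # calculate min by month
--     for i in range(1 ,13):
--         # set min = population on Earth
--         month_min = 7000000000
--         for data in date_case:
--             if data[1] == i and data[3] != 0:
--                 month_min = min(data[3], month_min)
--         if month_min == 7000000000:
--             min_list.append(0)
--         else:
--             min_list.append(month_min)
--     return min_list
-- ===== SOURCE B (Python) =====
-- def mn1(date_case):
--     month_min = {}
--     for data in date_case:
--         m, v = data[1], data[3]
--         if v != 0: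
--             cur = month_min.get(m)
--             if cur is None or v < cur:
--                 month_min[m] = v
--     return [month_min.get(m, 0) for m in range(1, 13)]
-- ===== Notes on version B (the rewrite author's own statement) =====
-- stated objective: alternative
-- what changed: Replaces the 12 repeated full scans of date_case (one per month) with a single bucketing pass that keeps the running minimum per month in a dict, then emits the 12 results from the dict.
import Mathlib
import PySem

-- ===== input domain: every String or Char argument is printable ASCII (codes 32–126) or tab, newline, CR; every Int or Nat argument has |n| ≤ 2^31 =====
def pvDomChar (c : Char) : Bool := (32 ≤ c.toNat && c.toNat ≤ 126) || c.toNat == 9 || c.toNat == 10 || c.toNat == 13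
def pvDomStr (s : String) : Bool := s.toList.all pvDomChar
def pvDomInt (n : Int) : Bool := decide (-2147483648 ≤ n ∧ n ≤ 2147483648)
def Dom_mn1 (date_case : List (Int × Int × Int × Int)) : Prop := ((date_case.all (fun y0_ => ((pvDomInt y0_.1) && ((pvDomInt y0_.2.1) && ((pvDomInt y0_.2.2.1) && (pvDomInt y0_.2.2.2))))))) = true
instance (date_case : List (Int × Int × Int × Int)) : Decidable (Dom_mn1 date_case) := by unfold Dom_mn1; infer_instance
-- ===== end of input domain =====

-- B replaces A's 12 full scans (one per month) by one bucketing pass keeping a per-month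
-- running minimum in a dict, then reads the 12 answers off the dict (objective: alternative).

-- ===== PORT A =====
def mn1 (date_case : List (Int × Int × Int × Int)) : List Int :=
  (PySem.List.pyRange 1 13 1).foldl (fun min_list i =>
    let month_min := date_case.foldl (fun month_min data =>
      if data.2.1 = i ∧ data.2.2.2 ≠ 0 then min data.2.2.2 month_min else month_min)
      7000000000
    if month_min = 7000000000 then min_list ++ [0] else min_list ++ [month_min]) []

-- ===== PORT B =====
def mn1_alt (date_case : List (Int × Int × Int × Int)) : List Int :=
  let month_min := date_case.foldl (fun d data =>
    let m := data.2.1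
    let v := data.2.2.2
    if v ≠ 0 then
      match d.get? m with
      | none => d.insert m v
      | some cur => if v < cur then d.insert m v else d
    else d) (PySem.Dict.empty : PySem.Dict Int Int)
  (PySem.List.pyRange 1 13 1).map (fun m => month_min.getD m 0)

-- ===== PRECONDITION & SPEC =====
def Spec_mn1 (date_case : List (Int × Int × Int × Int)) (out : List Int) : Prop := out = mn1_alt date_case
instance (date_case : List (Int × Int × Int × Int)) (out : List Int) : Decidable (Spec_mn1 date_case out) := by unfold Spec_mn1; infer_instance

-- ===== CLAIM (what is proved, stated in full; the proofs are below) =====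
def Claim_equal_mn1 : Prop := ∀ (date_case : List (Int × Int × Int × Int)), Dom_mn1 date_case → Spec_mn1 date_case (mn1 date_case)

-- ===== LEMMAS AND PROOFS =====

-- reference per-month fold on Option Int: none = "no nonzero value seen yet"
def hFold (m : Int) (o : Option Int) (data : Int × Int × Int × Int) : Option Int :=
  if data.2.1 = m ∧ data.2.2.2 ≠ 0 then
    some (match o with
          | none => data.2.2.2
          | some c => if data.2.2.2 < c then data.2.2.2 else c)
  else o

def repOpt (o : Option Int) : Int := o.getD 7000000000

-- A's inner scan for month m equals the Option fold, and the fold stays < 7e9 (Dom bound)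
theorem aFold_eq (m : Int) :
    ∀ (xs : List (Int × Int × Int × Int)),
      Dom_mn1 xs →
      ∀ (o : Option Int), (∀ c, o = some c → c < 7000000000) →
      xs.foldl (fun month_min data =>
        if data.2.1 = m ∧ data.2.2.2 ≠ 0 then min data.2.2.2 month_min else month_min)
        (repOpt o)
        = repOpt (xs.foldl (hFold m) o)
      ∧ (∀ c, xs.foldl (hFold m) o = some c → c < 7000000000) := by
  intro xs
  induction xs with
  | nil => intro _ o ho; exact ⟨rfl, ho⟩
  | cons data rest ih =>
    intro hdom o ho
    have hdomr : Dom_mn1 rest := by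
      simp [Dom_mn1, List.all_cons] at hdom ⊢; exact hdom.2
    have hv : (pvDomInt data.2.2.2) = true := by
      simp [Dom_mn1, List.all_cons] at hdom; exact hdom.1.2.2.2
    have hvlt : data.2.2.2 < 7000000000 := by
      simp [pvDomInt] at hv; omega
    simp only [List.foldl_cons]
    by_cases hc : data.2.1 = m ∧ data.2.2.2 ≠ 0
    · have hstep : (if data.2.1 = m ∧ data.2.2.2 ≠ 0 then min data.2.2.2 (repOpt o) else repOpt o)
          = repOpt (hFold m o data) := by
        cases o with
        | none =>
          simp [hc, hFold, repOpt, min_def]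
          omega
        | some c =>
          have hclt := ho c rfl
          simp [hc, hFold, repOpt, min_def]
          split <;> split <;> omega
      rw [hstep]
      refine ih hdomr (hFold m o data) ?_
      intro c hcc
      cases o with
      | none =>
        simp [hFold, hc] at hcc; omega
      | some c0 =>
        have := ho c0 rfl
        simp [hFold, hc] at hcc
        split at hcc <;> omega
    · have hstep : (if data.2.1 = m ∧ data.2.2.2 ≠ 0 then min data.2.2.2 (repOpt o) else repOpt o)
          = repOpt (hFold m o data) := by simp [hc, hFold]
      rw [hstep]
      refine ih hdomr (hFold m o data) ?_
      intro c hcc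
      simp [hFold, hc] at hcc
      exact ho c hcc

-- B's dict pass, read at key m, equals the Option fold
theorem bFold_get (m : Int) :
    ∀ (xs : List (Int × Int × Int × Int)) (d : PySem.Dict Int Int),
      (xs.foldl (fun d data =>
        let mk := data.2.1
        let v := data.2.2.2
        if v ≠ 0 then
          match d.get? mk with
          | none => d.insert mk v
          | some cur => if v < cur then d.insert mk v else d
        else d) d).get? m
      = xs.foldl (hFold m) (d.get? m) := by
  intro xs
  induction xs with
  | nil => intro d; rfl
  | cons data rest ih =>
    intro d
    simp only [List.foldl_cons]
    rw [ih]
    congr 1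
    by_cases hm : data.2.1 = m
    · subst hm
      by_cases hv : data.2.2.2 ≠ 0
      · cases hd : d.get? data.2.1 with
        | none =>
          simp [hv, hFold, PySem.Dict.get?_insert_self]
        | some cur =>
          by_cases hlt : data.2.2.2 < cur
          · simp [hv, hlt, hFold, PySem.Dict.get?_insert_self]
          · simp [hv, hd, hlt, hFold]
      · simp at hv
        simp [hv, hFold]
    · by_cases hv : data.2.2.2 ≠ 0
      · cases hd : d.get? data.2.1 with
        | none =>
          simp [hv, hFold, hm, PySem.Dict.get?_insert_of_ne _ _ (fun h => hm h.symm)]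
        | some cur =>
          by_cases hlt : data.2.2.2 < cur
          · simp [hv, hlt, hFold, hm, PySem.Dict.get?_insert_of_ne _ _ (fun h => hm h.symm)]
          · simp [hv, hlt, hFold, hm]
      · simp at hv
        simp [hv, hFold, hm]

-- A's foldl-with-append over the months is a map
theorem foldl_append_map (g : Int → Int) (S : Int) :
    ∀ (l : List Int) (acc : List Int),
      l.foldl (fun ml i => if g i = S then ml ++ [0] else ml ++ [g i]) acc
        = acc ++ l.map (fun i => if g i = S then 0 else g i) := by
  intro l
  induction l with
  | nil => intro acc; simp
  | cons i rest ih =>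
    intro acc
    simp only [List.foldl_cons, List.map_cons]
    by_cases h : g i = S
    · simp [h, ih]
    · simp [h, ih]

-- ===== VERDICT (by name: the statement is the Claim_ definition above) =====
theorem mn1_spec : Claim_equal_mn1 := by
  intro date_case hdom
  unfold Spec_mn1 mn1 mn1_alt
  rw [foldl_append_map
    (fun i => date_case.foldl (fun month_min data =>
      if data.2.1 = i ∧ data.2.2.2 ≠ 0 then min data.2.2.2 month_min else month_min) 7000000000)
    7000000000]
  simp only [List.nil_append]
  apply List.map_congr_left
  intro m _
  have hb := bFold_get m date_case PySem.Dict.empty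
  have ha := aFold_eq m date_case hdom none (by intro c hc; cases hc)
  have hget : (PySem.Dict.empty : PySem.Dict Int Int).get? m = none := rfl
  rw [hget] at hb
  rcases ha with ⟨ha1, ha2⟩
  have ha1' : date_case.foldl (fun month_min data =>
      if data.2.1 = m ∧ data.2.2.2 ≠ 0 then min data.2.2.2 month_min else month_min) 7000000000
      = repOpt (date_case.foldl (hFold m) none) := ha1
  rw [ha1']
  rw [PySem.Dict.getD_eq_get?_getD, hb]
  cases hres : date_case.foldl (hFold m) none with
  | none => simp [repOpt]
  | some c =>
    have := ha2 c hres
    simp [repOpt]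
    omega
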